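-- pv_equiv track=rewrite | github.com/pypi-data/pypi-mirror-321 | packages/KSSDS/KSSDS-1.0.5-py3-none-any.whl/KSSDS/inference.py | segment_predictions
-- ===== SOURCE A (Python) =====
-- def segment_predictions(inp, pred):
--     segments = []
--     current_segment = []
--     inp = inp[0]
--     pred = pred[0]
--
--     for token, label in zip(inp, pred):
--         if label == 1:  # End of a sentence
--             if current_segment:
--                 current_segment.append(token)
--                 segments.append(current_segment)
--                 current_segment = []
--             else:
--                 segments.append([token])
--         else:  # Continuation of a sentence
--             current_segment.append(token)
--
--     if current_segment:  # Add any remaining tokens as a final segment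
--         segments.append(current_segment)
--
--     return segments
-- ===== SOURCE B (Python) =====
-- def segment_predictions(inp, pred):
--     pairs = list(zip(inp[0], pred[0]))
--     tokens = [t for t, _ in pairs]
--     segments = []
--     start = 0
--     for i, (_, label) in enumerate(pairs):
--         if label == 1:
--             segments.append(tokens[start:i + 1])
--             start = i + 1
--     if start < len(tokens):
--         segments.append(tokens[start:])
--     return segments
-- ===== Notes on version B (the rewrite author's own statement) =====
-- stated objective: alternative
-- what changed: Instead of A's single pass that grows a current_segment accumulator token by token, B enumerates the zipped (token,label) pairs once, and at each label==1 boundary emits the segment as a slice tokens[start:i+1], appending the remaining tokens[start:] afterwards.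
-- outside the precondition, e.g. on segment_predictions([], [[1]]): A raises IndexError, B raises IndexError
import Mathlib
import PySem

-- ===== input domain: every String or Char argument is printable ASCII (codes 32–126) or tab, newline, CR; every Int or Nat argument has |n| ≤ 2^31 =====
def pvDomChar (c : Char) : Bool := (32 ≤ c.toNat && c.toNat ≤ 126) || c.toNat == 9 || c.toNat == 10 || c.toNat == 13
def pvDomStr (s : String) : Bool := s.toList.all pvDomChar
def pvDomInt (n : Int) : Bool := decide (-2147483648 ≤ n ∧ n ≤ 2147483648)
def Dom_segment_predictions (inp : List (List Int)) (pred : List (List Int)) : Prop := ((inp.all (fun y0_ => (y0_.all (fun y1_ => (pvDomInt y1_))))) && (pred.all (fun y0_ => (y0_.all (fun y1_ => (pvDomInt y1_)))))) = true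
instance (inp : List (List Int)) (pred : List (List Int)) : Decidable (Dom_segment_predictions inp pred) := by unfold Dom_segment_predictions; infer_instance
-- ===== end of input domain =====

-- B replaces A's per-token accumulator pass by one enumerate pass collecting boundary
-- indices and emitting each segment as a slice tokens[start:i+1] (objective: alternative decomposition).

-- ===== PORT A =====
-- A's loop over zip(inp[0], pred[0]) with state (segments, current_segment)
def aLoop : List (Int × Int) → List (List Int) → List Int → List (List Int)
  | [], segs, cur => if cur.isEmpty then segs else segs ++ [cur]
  | (t, label) :: rest, segs, cur =>
      if label = 1 then
        if cur.isEmpty then aLoop rest (segs ++ [[t]]) []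
        else aLoop rest (segs ++ [cur ++ [t]]) []
      else aLoop rest segs (cur ++ [t])

def segment_predictions (inp : List (List Int)) (pred : List (List Int)) : List (List Int) :=
  -- inp[0] / pred[0]: Python raises IndexError on empty lists; Pre_ excludes that, .getD [] is unreachable inside Pre_
  let a := (PySem.List.pyGet? inp 0).getD []
  let p := (PySem.List.pyGet? pred 0).getD []
  aLoop (a.zip p) [] []

-- ===== PORT B =====
-- for i, (_, label) in enumerate(pairs): collect slices at boundaries; state (segments, start)
def bLoop (tokens : List Int) : List (Int × (Int × Int)) → List (List Int) × Int → List (List Int) × Int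
  | [], st => st
  | (i, (_t, label)) :: rest, (segs, start) =>
      if label = 1 then
        bLoop tokens rest (segs ++ [PySem.List.slice tokens (some start) (some (i + 1))], i + 1)
      else bLoop tokens rest (segs, start)

def segment_predictions_alt (inp : List (List Int)) (pred : List (List Int)) : List (List Int) :=
  let a := (PySem.List.pyGet? inp 0).getD []
  let p := (PySem.List.pyGet? pred 0).getD []
  let pairs := a.zip p
  let tokens := pairs.map Prod.fst
  let r := bLoop tokens (PySem.List.enumerate pairs) ([], 0)
  if r.2 < (tokens.length : Int) then r.1 ++ [PySem.List.slice tokens (some r.2) none] else r.1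

-- ===== PRECONDITION & SPEC =====
-- Pre_ excludes exactly the inputs where Python A raises IndexError: inp[0] or pred[0] on an empty outer list
def Pre_segment_predictions (inp : List (List Int)) (pred : List (List Int)) : Prop := inp ≠ [] ∧ pred ≠ []
instance (inp : List (List Int)) (pred : List (List Int)) : Decidable (Pre_segment_predictions inp pred) := by unfold Pre_segment_predictions; infer_instance
def pvWitness_segment_predictions : List (List Int) × List (List Int) := ([[5, 6, 7]], [[0, 1, 0]])

def Spec_segment_predictions (inp : List (List Int)) (pred : List (List Int)) (out : List (List Int)) : Prop := out = segment_predictions_alt inp pred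
instance (inp : List (List Int)) (pred : List (List Int)) (out : List (List Int)) : Decidable (Spec_segment_predictions inp pred out) := by unfold Spec_segment_predictions; infer_instance

-- ===== CLAIM (what is proved, stated in full; the proofs are below) =====
def Claim_equal_segment_predictions : Prop := ∀ (inp : List (List Int)) (pred : List (List Int)), Dom_segment_predictions inp pred → Pre_segment_predictions inp pred → Spec_segment_predictions inp pred (segment_predictions inp pred)

-- ===== LEMMAS AND PROOFS =====

-- common specification: split the pair stream at label-1 positions, cur = pending tokens
def fSpec : List (Int × Int) → List Int → List (List Int)
  | [], cur => if cur = [] then [] else [cur]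
  | (t, l) :: rest, cur => if l = 1 then (cur ++ [t]) :: fSpec rest [] else fSpec rest (cur ++ [t])

theorem aLoop_eq_fSpec (zs : List (Int × Int)) : ∀ segs cur, aLoop zs segs cur = segs ++ fSpec zs cur := by
  induction zs with
  | nil =>
      intro segs cur
      simp [aLoop, fSpec, List.isEmpty_iff]
      split <;> simp
  | cons hd tl ih =>
      intro segs cur
      obtain ⟨t, l⟩ := hd
      by_cases hl : l = 1
      · by_cases hc : cur = []
        · simp [aLoop, fSpec, hl, hc, ih]
        · simp [aLoop, fSpec, hl, List.isEmpty_iff, hc, ih]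
      · simp [aLoop, fSpec, hl, ih]

theorem bLoop_eq_fSpec (zs : List (Int × Int)) :
    ∀ (k s : Nat) (segs : List (List Int)) (T : List Int),
      s ≤ k → T.drop k = zs.map Prod.fst →
      (let r := bLoop T (PySem.List.enumerate zs (k : Int)) (segs, (s : Int));
       if r.2 < (T.length : Int) then r.1 ++ [PySem.List.slice T (some r.2) none] else r.1)
      = segs ++ fSpec zs ((T.take k).drop s) := by
  induction zs with
  | nil =>
      intro k s segs T hsk hdrop
      have hlen : T.length ≤ k := by
        by_contra h
        have := congrArg List.length hdrop
        simp [List.length_drop] at this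
        omega
      have htake : T.take k = T := List.take_of_length_le hlen
      simp only [PySem.List.enumerate, bLoop, fSpec, htake]
      rw [PySem.List.slice_from_natCast]
      by_cases hs : s < T.length
      · have hne : T.drop s ≠ [] := by
          simp [List.drop_eq_nil_iff]; omega
        simp [hs, hne]
      · have he : T.drop s = [] := by
          rw [List.drop_eq_nil_iff]; omega
        simp [he]
        omega
  | cons hd tl ih =>
      intro k s segs T hsk hdrop
      obtain ⟨t, l⟩ := hd
      have hk : k < T.length := by
        by_contra h
        rw [List.drop_eq_nil_iff.mpr (by omega)] at hdrop
        simp at hdrop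
      have hTk : T[k] = t := by
        have : T.drop k = T[k] :: T.drop (k + 1) := List.drop_eq_getElem_cons hk
        rw [this] at hdrop
        exact (List.cons_eq_cons.mp hdrop).1
      have hdrop' : T.drop (k + 1) = tl.map Prod.fst := by
        have : T.drop k = T[k] :: T.drop (k + 1) := List.drop_eq_getElem_cons hk
        rw [this] at hdrop
        exact (List.cons_eq_cons.mp hdrop).2
      have htakesucc : T.take (k + 1) = T.take k ++ [t] := by
        rw [List.take_add_one]
        simp [List.getElem?_eq_getElem hk, hTk]
      have hcur : (T.take (k + 1)).drop s = (T.take k).drop s ++ [t] := by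
        rw [htakesucc, List.drop_append_of_le_length (by simp; omega)]
      have hcast : (k : Int) + 1 = ((k + 1 : Nat) : Int) := by push_cast; ring
      by_cases hl : l = 1
      · simp only [PySem.List.enumerate, bLoop, hl, if_true]
        rw [hcast]
        have := ih (k + 1) (k + 1) (segs ++ [PySem.List.slice T (some (s : Int)) (some ((k + 1 : Nat) : Int))]) T (le_refl _) hdrop'
        simp only at this ⊢
        rw [this]
        have hslice : PySem.List.slice T (some (s : Int)) (some ((k + 1 : Nat) : Int)) = (T.take (k + 1)).drop s := by
          rw [PySem.List.slice_natCast, List.drop_take]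
        rw [hslice]
        simp [fSpec, hcur, List.drop_take]
      · simp only [PySem.List.enumerate, bLoop, hl, if_false]
        rw [hcast]
        have := ih (k + 1) s segs T (by omega) hdrop'
        simp only at this ⊢
        rw [this]
        simp [fSpec, hl, hcur]

-- ===== VERDICT (by name: the statement is the Claim_ definition above) =====
theorem segment_predictions_spec : Claim_equal_segment_predictions := by
  intro inp pred _hdom _hpre
  unfold Spec_segment_predictions segment_predictions segment_predictions_alt
  simp only []
  set a := (PySem.List.pyGet? inp 0).getD [] with ha
  set p := (PySem.List.pyGet? pred 0).getD [] with hp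
  have hB := bLoop_eq_fSpec (a.zip p) 0 0 [] ((a.zip p).map Prod.fst) (le_refl 0)
      (by simp)
  have hcast0 : ((0 : Nat) : Int) = 0 := rfl
  rw [hcast0] at hB
  have henum : PySem.List.enumerate (a.zip p) (0 : Int) = PySem.List.enumerate (a.zip p) := rfl
  rw [henum] at hB
  simp only at hB
  rw [aLoop_eq_fSpec, hB]
  simp
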